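-- pv_equiv track=rewrite | github.com/mukunda1518/Data-Structures-Algorithms | heaps/process_processor_schedule.py | get_minimum_time
-- ===== SOURCE A (Python) =====
-- import heapq
--
-- def get_minimum_time(process_sizes, capacity):
--     max_capcity = max(capacity)
--     max_process_size = max(process_sizes)
--     if max_process_size > max_capcity:
--         return -1
--
--     # sort the processes by size largest
--     processes = sorted(process_sizes, reverse=True)
--
--     # create a min heap for available processors
--     # format: (time_available, -processor_capacity)
--     processors = [(0, -capacity[i]) for i in range(len(capacity))]
--     heapq.heapify(processors)
--
--     for size in processes:
--         # try to find a capable processor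
--         temp_processors = []
--         found_capable = False
--
--         while processors and not found_capable:
--             time, capacity = heapq.heappop(processors)
--
--             if -capacity >= size:  # this processor can handle the process
--                 heapq.heappush(processors, (time + 2, capacity))  # +2 for execute + pause
--                 found_capable = True
--             else:
--                 temp_processors.append((time, capacity))
--
--         if not found_capable:
--             return -1  # no capable processor found
--
--         for proc in temp_processors:
--             heapq.heappush(processors, proc)
--
--     return max(0, max(time for time, _ in processors) - 1)
-- ===== SOURCE B (Python) =====
-- import heapq
--
-- def get_minimum_time(process_sizes, capacity):
--     if max(process_sizes) > max(capacity):
--         return -1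
--     procs = sorted(capacity)                    # ascending by capacity
--     heap = []                                   # eligible processors: (time_available, -capacity)
--     i = len(procs)
--     for size in sorted(process_sizes, reverse=True):
--         # sizes shrink, so processors become eligible once and stay eligible
--         while i > 0 and procs[i - 1] >= size:
--             i -= 1
--             heapq.heappush(heap, (0, -procs[i]))
--         t, negc = heapq.heappop(heap)
--         heapq.heappush(heap, (t + 2, negc))
--     return max(t for t, _ in heap) - 1
-- ===== Notes on version B (the rewrite author's own statement) =====
-- stated objective: alternative
-- what changed: A pops every not-yet-capable processor off the heap again for every process; B instead sorts processors by capacity once and, walking the process sizes in descending order, moves each processor into the availability heap exactly once, popping only the chosen processor per process.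
import Mathlib
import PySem

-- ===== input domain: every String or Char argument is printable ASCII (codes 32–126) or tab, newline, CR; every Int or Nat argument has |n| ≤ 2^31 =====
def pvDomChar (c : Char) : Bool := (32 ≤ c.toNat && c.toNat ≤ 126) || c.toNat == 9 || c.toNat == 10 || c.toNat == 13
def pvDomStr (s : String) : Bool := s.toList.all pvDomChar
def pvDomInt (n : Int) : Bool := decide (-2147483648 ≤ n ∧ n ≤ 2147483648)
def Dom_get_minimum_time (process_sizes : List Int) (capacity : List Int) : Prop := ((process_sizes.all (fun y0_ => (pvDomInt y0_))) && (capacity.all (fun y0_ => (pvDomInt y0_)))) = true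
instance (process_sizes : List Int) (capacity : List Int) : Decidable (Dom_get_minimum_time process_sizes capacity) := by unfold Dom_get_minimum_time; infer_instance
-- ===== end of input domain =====

-- B replaces A's per-process rescan of the whole processor heap (popping every
-- not-yet-capable processor each round) by a single pass over capacity-sorted
-- processors that feeds a heap of currently-eligible ones (objective: alternative).
-- heapq is modeled as a SORTED LIST (pop = head, push = ordered insert): exact on
-- popped values, since heapq pops tuples in nondecreasing order and equal tuples
-- are indistinguishable.


-- Python's `<=` on int pairs (lexicographic), as the heap order
def tle (a b : Int × Int) : Bool := decide (a.1 < b.1 ∨ (a.1 = b.1 ∧ a.2 ≤ b.2))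

-- heappush on the sorted-list heap: ordered insert
def hpush (x : Int × Int) : List (Int × Int) → List (Int × Int)
  | [] => [x]
  | y :: t => if tle x y then x :: y :: t else y :: hpush x t

-- ===== PORT A =====
-- A's inner `while processors and not found_capable` loop: pop (= take the head of
-- the sorted list) until a capable processor is found; `none` = not found.
def aScan (size : Int) : List (Int × Int) → List (Int × Int) → List (Int × Int) × Option (List (Int × Int))
  | [], temp => (temp, none)
  | (t, negc) :: rest, temp =>
    if size ≤ -negc then (temp, some (hpush (t + 2, negc) rest))
    else aScan size rest (temp ++ [(t, negc)])

-- one iteration of A's `for size in processes` loop (push temp_processors back)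
def aStep (heap : List (Int × Int)) (size : Int) : Option (List (Int × Int)) :=
  match aScan size heap [] with
  | (_, none) => none
  | (temp, some h) => some (temp.foldl (fun acc p => hpush p acc) h)

def get_minimum_time (process_sizes : List Int) (capacity : List Int) : Int :=
  match PySem.List.max? capacity (fun y => y), PySem.List.max? process_sizes (fun y => y) with
  | some max_capcity, some max_process_size =>
    if max_process_size > max_capcity then -1
    else
      let processes := PySem.List.sorted process_sizes (fun y => y) true
      -- [(0, -capacity[i]) ...] then heapify (= build the sorted list by pushes)
      let processors := (capacity.map (fun c => ((0 : Int), -c))).foldl (fun h x => hpush x h) []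
      match processes.foldl (fun st size => match st with | none => none | some h => aStep h size) (some processors) with
      | none => -1
      | some heap =>
        match PySem.List.max? (heap.map Prod.fst) (fun y => y) with
        | some m => max 0 (m - 1)
        | none => 0   -- unreachable: the heap is never empty (capacity ≠ [])
  | _, _ => 0         -- unreachable under Pre_: max() on an empty list raises

-- ===== PORT B =====
-- B's own copy of the tuple order and of heappush on the sorted-list heap
def tleB (a b : Int × Int) : Bool := decide (a.1 < b.1 ∨ (a.1 = b.1 ∧ a.2 ≤ b.2))

def hpushB (x : Int × Int) : List (Int × Int) → List (Int × Int)
  | [] => [x]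
  | y :: t => if tleB x y then x :: y :: t else y :: hpushB x t

-- B's inner `while i > 0 and procs[i-1] >= size` loop: move newly eligible
-- processors (capacity ≥ size) from the sorted capacity list into the heap.
def bFill (procs : List Int) (size : Int) : Nat → List (Int × Int) → Nat × List (Int × Int)
  | 0, h => (0, h)
  | i + 1, h =>
    if size ≤ procs.getD i 0 then bFill procs size i (hpushB (0, -(procs.getD i 0)) h)
    else (i + 1, h)

-- one iteration of B's `for size in sorted(...)` loop: fill, heappop, heappush
-- (the [] branch of heappop is unreachable: Python would raise there)
def bStep (procs : List Int) (st : Nat × List (Int × Int)) (size : Int) : Nat × List (Int × Int) :=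
  let r := bFill procs size st.1 st.2
  (r.1, (r.2.head?).elim [] (fun p => hpushB (p.1 + 2, p.2) r.2.tail))

-- `.elim 0 …` supplies the (unreachable) value where Python's max()/heappop would raise
def get_minimum_time_alt (process_sizes : List Int) (capacity : List Int) : Int :=
  (PySem.List.max? process_sizes (fun y => y)).elim 0 (fun mp =>
    (PySem.List.max? capacity (fun y => y)).elim 0 (fun mc =>
      if mp > mc then -1
      else
        let procs := PySem.List.sorted capacity (fun y => y) false
        let r := (PySem.List.sorted process_sizes (fun y => y) true).foldl (bStep procs) (procs.length, [])
        (PySem.List.max? (r.2.map Prod.fst) (fun y => y)).elim 0 (fun m => m - 1)))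

-- ===== PRECONDITION & SPEC =====
-- Pre_ excludes exactly the inputs where Python A raises: max() on an empty list (ValueError).
def Pre_get_minimum_time (process_sizes : List Int) (capacity : List Int) : Prop :=
  process_sizes ≠ [] ∧ capacity ≠ []
instance (process_sizes : List Int) (capacity : List Int) : Decidable (Pre_get_minimum_time process_sizes capacity) := by unfold Pre_get_minimum_time; infer_instance
def pvWitness_get_minimum_time : List Int × List Int := ([2, 1, 2], [3, 1])
def Spec_get_minimum_time (process_sizes : List Int) (capacity : List Int) (out : Int) : Prop := out = get_minimum_time_alt process_sizes capacity
instance (process_sizes : List Int) (capacity : List Int) (out : Int) : Decidable (Spec_get_minimum_time process_sizes capacity out) := by unfold Spec_get_minimum_time; infer_instance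

-- ===== CLAIM (what is proved, stated in full; the proofs are below) =====
def Claim_equal_get_minimum_time : Prop := ∀ (process_sizes : List Int) (capacity : List Int), Dom_get_minimum_time process_sizes capacity → Pre_get_minimum_time process_sizes capacity → Spec_get_minimum_time process_sizes capacity (get_minimum_time process_sizes capacity)

-- ===== LEMMAS AND PROOFS =====

-- the heap order as a Prop
def lep (a b : Int × Int) : Prop := a.1 < b.1 ∨ (a.1 = b.1 ∧ a.2 ≤ b.2)

-- processors not yet eligible: capacities procs[0:i], each as a heap entry
def pend (procs : List Int) (i : Nat) : List (Int × Int) :=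
  (procs.take i).map (fun c => ((0 : Int), -c))

theorem tle_iff (a b : Int × Int) : tle a b = true ↔ lep a b := by
  simp [tle, lep]

theorem lep_refl (a : Int × Int) : lep a a := by simp [lep]

theorem lep_total (a b : Int × Int) : lep a b ∨ lep b a := by
  simp only [lep]; omega

theorem lep_trans {a b c : Int × Int} (h1 : lep a b) (h2 : lep b c) : lep a c := by
  simp only [lep] at *; omega

theorem lep_antisymm {a b : Int × Int} (h1 : lep a b) (h2 : lep b a) : a = b := by
  obtain ⟨a1, a2⟩ := a; obtain ⟨b1, b2⟩ := b
  simp only [lep] at h1 h2; simp only [Prod.mk.injEq]; omega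

theorem hpushB_eq (x : Int × Int) (h : List (Int × Int)) : hpushB x h = hpush x h := by
  induction h with
  | nil => rfl
  | cons y t ih =>
    simp only [hpushB, hpush, tleB, tle, ih]
    rfl

theorem hpush_perm (x : Int × Int) (h : List (Int × Int)) : (hpush x h).Perm (x :: h) := by
  induction h with
  | nil => simp [hpush]
  | cons y t ih =>
    simp only [hpush]
    split
    · exact List.Perm.refl _
    · exact (ih.cons y).trans (List.Perm.swap x y t)

theorem mem_hpush {x z : Int × Int} {h : List (Int × Int)} :
    z ∈ hpush x h ↔ z = x ∨ z ∈ h := by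
  rw [(hpush_perm x h).mem_iff]; simp

theorem hpush_pairwise (x : Int × Int) {h : List (Int × Int)} (hs : List.Pairwise lep h) :
    List.Pairwise lep (hpush x h) := by
  induction h with
  | nil => simp [hpush]
  | cons y t ih =>
    rcases List.pairwise_cons.mp hs with ⟨hy, ht⟩
    simp only [hpush]
    split
    · rename_i htle
      have hxy : lep x y := (tle_iff x y).mp htle
      refine List.pairwise_cons.mpr ⟨?_, hs⟩
      intro z hz
      rcases List.mem_cons.mp hz with rfl | hz
      · exact hxy
      · exact lep_trans hxy (hy z hz)
    · rename_i htle
      have hyx : lep y x := by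
        rcases lep_total x y with h' | h'
        · exact absurd ((tle_iff x y).mpr h') htle
        · exact h'
      refine List.pairwise_cons.mpr ⟨?_, ih ht⟩
      intro z hz
      rcases mem_hpush.mp hz with rfl | hz
      · exact hyx
      · exact hy z hz

theorem foldl_hpush_perm (l h : List (Int × Int)) :
    (l.foldl (fun acc p => hpush p acc) h).Perm (h ++ l) := by
  induction l generalizing h with
  | nil => simp
  | cons p l ih =>
    simp only [List.foldl_cons]
    refine (ih (hpush p h)).trans ?_
    refine (List.Perm.append_right l (hpush_perm p h)).trans ?_
    exact List.perm_middle.symm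

theorem foldl_hpush_pairwise (l : List (Int × Int)) {h : List (Int × Int)}
    (hs : List.Pairwise lep h) : List.Pairwise lep (l.foldl (fun acc p => hpush p acc) h) := by
  induction l generalizing h with
  | nil => exact hs
  | cons p l ih => exact ih (hpush_pairwise p hs)

theorem aScan_eq (size : Int) (h temp : List (Int × Int)) :
    aScan size h temp =
      match h.dropWhile (fun x => decide (-x.2 < size)) with
      | [] => (temp ++ h, none)
      | x :: rest => (temp ++ h.takeWhile (fun x => decide (-x.2 < size)), some (hpush (x.1 + 2, x.2) rest)) := by
  induction h generalizing temp with
  | nil => simp [aScan]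
  | cons y t ih =>
    obtain ⟨yt, ync⟩ := y
    by_cases hc : size ≤ -ync
    · simp [aScan, hc, not_lt.mpr hc]
    · have hlt : -ync < size := lt_of_not_ge hc
      simp only [aScan, if_neg hc, ih, List.dropWhile_cons, List.takeWhile_cons]
      simp only [hlt, if_pos, decide_true]
      split <;> simp

theorem bFill_spec (procs : List Int) (size : Int) :
    ∀ (i : Nat) (h : List (Int × Int)), i ≤ procs.length →
    (bFill procs size i h).1 ≤ i ∧
    (bFill procs size i h).2.Perm
      (h ++ ((procs.take i).drop (bFill procs size i h).1).map (fun c => ((0 : Int), -c))) ∧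
    (List.Pairwise lep h → List.Pairwise lep (bFill procs size i h).2) ∧
    ((bFill procs size i h).1 = 0 ∨ procs.getD ((bFill procs size i h).1 - 1) 0 < size) ∧
    (∀ c ∈ (procs.take i).drop (bFill procs size i h).1, size ≤ c) ∧
    (0 < i → size ≤ procs.getD (i - 1) 0 → (bFill procs size i h).1 < i) := by
  intro i
  induction i with
  | zero => intro h _; simp [bFill]
  | succ j ih =>
    intro h hij
    by_cases hc : size ≤ procs.getD j 0
    · have hstep : bFill procs size (j + 1) h = bFill procs size j (hpush (0, -(procs.getD j 0)) h) := by
        rw [bFill, if_pos hc, hpushB_eq]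
      obtain ⟨h1, h2, h3, h4, h5, _⟩ := ih (hpush (0, -(procs.getD j 0)) h) (by omega)
      rw [hstep]
      set r := bFill procs size j (hpush (0, -(procs.getD j 0)) h) with hr
      have hjlen : j < procs.length := by omega
      have htake : procs.take (j + 1) = procs.take j ++ [procs.getD j 0] := by
        rw [List.take_add_one]
        congr 1
        rw [List.getD_eq_getElem procs 0 hjlen]
        simp [List.getElem?_eq_getElem hjlen]
      have hdrop : (procs.take (j + 1)).drop r.1 =
          (procs.take j).drop r.1 ++ [procs.getD j 0] := by
        rw [htake, List.drop_append_of_le_length (by simp only [List.length_take]; omega)]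
      refine ⟨by omega, ?_, fun hs => h3 (hpush_pairwise _ hs), h4, ?_, by intro _ _; omega⟩
      · rw [hdrop]
        refine h2.trans ?_
        refine ((hpush_perm _ h).append_right _).trans ?_
        simp only [List.cons_append, List.map_append, List.map_cons, List.map_nil]
        rw [← List.append_assoc]
        exact (List.perm_append_singleton _ _).symm
      · rw [hdrop]
        intro c hcm
        rcases List.mem_append.mp hcm with hcm | hcm
        · exact h5 c hcm
        · rw [List.mem_singleton] at hcm; exact hcm ▸ hc
    · have hstep : bFill procs size (j + 1) h = (j + 1, h) := by
        rw [bFill, if_neg hc]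
      rw [hstep]
      simp only []
      refine ⟨le_refl _, by simp, fun hs => hs, Or.inr (by simpa using lt_of_not_ge hc), ?_, ?_⟩
      · simp
      · intro _ hle; exact absurd (by simpa using hle) hc

theorem dropWhile_head_false {α : Type} (p : α → Bool) (l : List α) {x : α} {rest : List α}
    (h : l.dropWhile p = x :: rest) : p x = false := by
  induction l with
  | nil => simp [List.dropWhile] at h
  | cons y t ih =>
    by_cases hy : p y = true
    · rw [List.dropWhile_cons, if_pos hy] at h; exact ih h
    · rw [List.dropWhile_cons, if_neg hy] at h
      obtain ⟨rfl, -⟩ := List.cons.injEq .. ▸ h |> And.intro h |>.1 |> List.cons.inj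
      simpa using hy

theorem step_lemma (procs : List Int) (size : Int) (i : Nat) (hA hB : List (Int × Int))
    (hp : procs.Pairwise (· ≤ ·)) (hlen : 0 < procs.length)
    (hi : i ≤ procs.length) (hcount : hB.length + i = procs.length)
    (hsz : size ≤ procs.getD (procs.length - 1) 0)
    (hperm : hA.Perm (hB ++ pend procs i))
    (hsA : List.Pairwise lep hA) (hsB : List.Pairwise lep hB)
    (htime : ∀ x ∈ hA, 0 ≤ x.1) (hcap : ∀ x ∈ hB, size ≤ -x.2) :
    ∃ hA', aStep hA size = some hA' ∧
      (bStep procs (i, hB) size).1 ≤ procs.length ∧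
      (bStep procs (i, hB) size).2.length + (bStep procs (i, hB) size).1 = procs.length ∧
      hA'.Perm ((bStep procs (i, hB) size).2 ++ pend procs (bStep procs (i, hB) size).1) ∧
      List.Pairwise lep hA' ∧ List.Pairwise lep (bStep procs (i, hB) size).2 ∧
      (∀ x ∈ hA', 0 ≤ x.1) ∧ (∀ x ∈ (bStep procs (i, hB) size).2, size ≤ -x.2) ∧
      (∃ x ∈ (bStep procs (i, hB) size).2, 2 ≤ x.1) := by
  obtain ⟨f1, f2, f3, f4, f5, f6⟩ := bFill_spec procs size i hB hi
  set r := bFill procs size i hB with hrdef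
  have hi'len : r.1 < procs.length := by
    rcases Nat.lt_or_ge i procs.length with h' | h'
    · omega
    · have hieq : i = procs.length := le_antisymm hi h'
      have := f6 (by omega) (by rw [hieq]; exact hsz)
      omega
  have hlen2 : r.2.length = procs.length - r.1 := by
    have hl := f2.length_eq
    simp only [List.length_append, List.length_map, List.length_drop, List.length_take] at hl
    omega
  have hBBne : r.2 ≠ [] := by
    intro h0; rw [h0] at hlen2; simp at hlen2; omega
  obtain ⟨m, tb, hmt⟩ := List.exists_cons_of_ne_nil hBBne
  have hsBB : List.Pairwise lep r.2 := f3 hsB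
  have hmemBB : ∀ x ∈ r.2, size ≤ -x.2 ∧ (x ∈ hB ∨ x.1 = 0) := by
    intro x hx
    rcases List.mem_append.mp (f2.mem_iff.mp hx) with hxh | hxm
    · exact ⟨hcap x hxh, Or.inl hxh⟩
    · obtain ⟨c, hcmem, rfl⟩ := List.mem_map.mp hxm
      exact ⟨by simpa using f5 c hcmem, Or.inr rfl⟩
  have hpend : ∀ x ∈ pend procs r.1, -x.2 < size := by
    intro x hx
    obtain ⟨c, hcmem, rfl⟩ := List.mem_map.mp hx
    obtain ⟨k, hk', hck⟩ := List.mem_iff_getElem.mp hcmem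
    rw [List.getElem_take] at hck
    have hk1 : k < r.1 := by simp only [List.length_take] at hk'; omega
    have hkl : k < procs.length := by omega
    rcases f4 with h0 | hlast
    · omega
    · have hr1 : r.1 - 1 < procs.length := by omega
      rw [List.getD_eq_getElem procs 0 hr1] at hlast
      simp only [neg_neg]
      rcases Nat.lt_or_ge k (r.1 - 1) with hk2 | hk2
      · have hmono := List.pairwise_iff_getElem.mp hp k (r.1 - 1) hkl hr1 hk2
        rw [hck] at hmono; omega
      · have hkeq : k = r.1 - 1 := by omega
        subst hkeq
        rw [hck] at hlast; omega
  have hpermA : hA.Perm (r.2 ++ pend procs r.1) := by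
    have htake2 : procs.take i = procs.take r.1 ++ (procs.take i).drop r.1 := by
      conv_lhs => rw [← List.take_append_drop r.1 (procs.take i)]
      congr 1
      rw [List.take_take]
      congr 1
      omega
    have hpi : pend procs i = pend procs r.1 ++ ((procs.take i).drop r.1).map (fun c => ((0:Int), -c)) := by
      unfold pend
      conv_lhs => rw [htake2]
      rw [List.map_append]
    refine hperm.trans ?_
    rw [hpi]
    refine (List.Perm.append_left hB List.perm_append_comm).trans ?_
    rw [← List.append_assoc]
    exact List.Perm.append_right _ f2.symm
  have hmBB : m ∈ r.2 := by rw [hmt]; exact List.mem_cons_self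
  have hmA : m ∈ hA := hpermA.mem_iff.mpr (List.mem_append_left _ hmBB)
  have hsplit := List.takeWhile_append_dropWhile (p := fun x : Int × Int => decide (-x.2 < size)) (l := hA)
  have hdwne : hA.dropWhile (fun x : Int × Int => decide (-x.2 < size)) ≠ [] := by
    intro h0
    rw [h0, List.append_nil] at hsplit
    have := List.mem_takeWhile_imp (hsplit ▸ hmA)
    have hm2 := (hmemBB m hmBB).1
    simp at this; omega
  obtain ⟨x, rest, hdw⟩ := List.exists_cons_of_ne_nil hdwne
  have hpx : size ≤ -x.2 := by
    have := dropWhile_head_false _ hA hdw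
    simp at this; omega
  have hxA : hA = hA.takeWhile (fun x : Int × Int => decide (-x.2 < size)) ++ x :: rest := by
    rw [← hdw, hsplit]
  have hdwpw : List.Pairwise lep (x :: rest) := by
    rw [← hdw]
    exact hsA.sublist (List.dropWhile_sublist _)
  have hxmem : x ∈ hA := by rw [hxA]; exact List.mem_append_right _ List.mem_cons_self
  have hxBB : x ∈ r.2 := by
    rcases List.mem_append.mp (hpermA.mem_iff.mp hxmem) with h' | h'
    · exact h'
    · exact absurd (hpend x h') (by omega)
  have hxm : x = m := by
    refine lep_antisymm ?_ ?_
    · -- lep x m : m is in x :: rest, x is least there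
      have hmxr : m ∈ x :: rest := by
        rcases List.mem_append.mp (hxA ▸ hmA) with h' | h'
        · have := List.mem_takeWhile_imp h'
          have hm2 := (hmemBB m hmBB).1
          simp at this; omega
        · exact h'
      rcases List.mem_cons.mp hmxr with rfl | h'
      · exact lep_refl _
      · exact (List.pairwise_cons.mp hdwpw).1 m h'
    · -- lep m x : x ∈ r.2 = m :: tb, m least
      rcases List.mem_cons.mp (hmt ▸ hxBB) with rfl | h'
      · exact lep_refl _
      · exact (List.pairwise_cons.mp (hmt ▸ hsBB)).1 x h'
  have hbstep : bStep procs (i, hB) size = (r.1, hpush (m.1 + 2, m.2) tb) := by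
    have hre : bFill procs size i hB = (r.1, m :: tb) := by
      rw [← hrdef, ← hmt]
    rcases m with ⟨m1, m2⟩
    simp [bStep, hre, hpushB_eq]
  have hastep : aStep hA size = some ((hA.takeWhile (fun x : Int × Int => decide (-x.2 < size))).foldl
      (fun acc q => hpush q acc) (hpush (x.1 + 2, x.2) rest)) := by
    rw [aStep, aScan_eq, hdw]
    rfl
  set tw := hA.takeWhile (fun x : Int × Int => decide (-x.2 < size)) with htw
  refine ⟨_, hastep, ?_⟩
  rw [hbstep]
  have hpushlen : ∀ (y : Int × Int) (l : List (Int × Int)), (hpush y l).length = l.length + 1 := by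
    intro y l; exact (hpush_perm y l).length_eq.trans (by simp)
  have htblen : tb.length + 1 = r.2.length := by rw [hmt]; simp
  -- key multiset identity: remove the selected processor from both sides
  have hkey : (tw ++ rest).Perm (tb ++ pend procs r.1) := by
    have h1 : (x :: (tw ++ rest)).Perm (x :: (tb ++ pend procs r.1)) := by
      refine List.Perm.trans List.perm_middle.symm ?_
      rw [← hxA]
      refine hpermA.trans ?_
      rw [hmt, hxm]
      exact List.Perm.refl _
    exact h1.cons_inv
  have htwsub : ∀ z ∈ tw, z ∈ hA := fun z hz => by
    rw [hxA]; exact List.mem_append_left _ hz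
  have hrestsub : ∀ z ∈ rest, z ∈ hA := fun z hz => by
    rw [hxA]; exact List.mem_append_right _ (List.mem_cons_of_mem _ hz)
  have hx1 : 0 ≤ x.1 := htime x hxmem
  -- the new A heap, via its multiset
  have hApm : (tw.foldl (fun acc q => hpush q acc) (hpush (x.1 + 2, x.2) rest)).Perm
      ((x.1 + 2, x.2) :: (tw ++ rest)) := by
    refine (foldl_hpush_perm tw (hpush (x.1 + 2, x.2) rest)).trans ?_
    refine (List.Perm.append_right tw (hpush_perm _ rest)).trans ?_
    rw [List.cons_append]
    exact List.Perm.cons _ List.perm_append_comm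
  refine ⟨by omega, ?_, ?_, ?_, ?_, ?_, ?_, ?_⟩
  · -- lengths
    simp only [hpushlen]; omega
  · -- permutation
    refine hApm.trans ?_
    have : ((x.1 + 2, x.2) :: (tw ++ rest)).Perm ((x.1 + 2, x.2) :: (tb ++ pend procs r.1)) :=
      hkey.cons _
    refine this.trans ?_
    rw [hxm]
    refine List.Perm.trans ?_ ((hpush_perm (m.1 + 2, m.2) tb).append_right _).symm
    rw [List.cons_append]
  · -- Pairwise of new A heap
    refine foldl_hpush_pairwise tw (hpush_pairwise _ ?_)
    exact (List.pairwise_cons.mp hdwpw).2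
  · -- Pairwise of new B heap
    exact hpush_pairwise _ (List.pairwise_cons.mp (hmt ▸ hsBB)).2
  · -- times of new A heap nonneg
    intro z hz
    rcases List.mem_cons.mp (hApm.mem_iff.mp hz) with rfl | hz'
    · simp; omega
    · rcases List.mem_append.mp hz' with h' | h'
      · exact htime z (htwsub z h')
      · exact htime z (hrestsub z h')
  · -- capacities of new B heap
    intro z hz
    rcases mem_hpush.mp hz with rfl | hz'
    · have := (hmemBB m hmBB).1; simpa using this
    · exact (hmemBB z (by rw [hmt]; exact List.mem_cons_of_mem _ hz')).1
  · -- a scheduled processor with finish time ≥ 2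
    refine ⟨(m.1 + 2, m.2), mem_hpush.mpr (Or.inl rfl), ?_⟩
    have : 0 ≤ m.1 := htime m hmA
    simpa using this

theorem fold_lemma (procs : List Int) :
    ∀ (sizes : List Int) (i : Nat) (hA hB : List (Int × Int)),
    procs.Pairwise (· ≤ ·) → 0 < procs.length →
    List.Pairwise (fun a b => b ≤ a) sizes →
    (∀ s ∈ sizes, s ≤ procs.getD (procs.length - 1) 0) →
    i ≤ procs.length → hB.length + i = procs.length →
    hA.Perm (hB ++ pend procs i) → List.Pairwise lep hA → List.Pairwise lep hB →
    (∀ x ∈ hA, 0 ≤ x.1) → (∀ s ∈ sizes, ∀ x ∈ hB, s ≤ -x.2) →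
    ∃ hA', sizes.foldl (fun st size => match st with | none => none | some h => aStep h size) (some hA) = some hA' ∧
      hA'.Perm ((sizes.foldl (bStep procs) (i, hB)).2 ++ pend procs (sizes.foldl (bStep procs) (i, hB)).1) ∧
      (((∃ x ∈ hB, 2 ≤ x.1) ∨ sizes ≠ []) → ∃ x ∈ (sizes.foldl (bStep procs) (i, hB)).2, 2 ≤ x.1) ∧
      (∀ x ∈ hA', 0 ≤ x.1) := by
  intro sizes
  induction sizes with
  | nil =>
    intro i hA hB _ _ _ _ _ _ hperm _ _ htime _
    refine ⟨hA, rfl, hperm, ?_, htime⟩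
    intro h
    rcases h with h | h
    · exact h
    · exact absurd rfl h
  | cons s ss ih =>
    intro i hA hB hp hlen hszs hbound hi hcount hperm hsA hsB htime hcap
    obtain ⟨hA1, hastep, g1, g2, g3, g4, g5, g6, g7, g8⟩ :=
      step_lemma procs s i hA hB hp hlen hi hcount (hbound s List.mem_cons_self) hperm hsA hsB htime
        (hcap s List.mem_cons_self)
    have hcap' : ∀ s' ∈ ss, ∀ x ∈ (bStep procs (i, hB) s).2, s' ≤ -x.2 := by
      intro s' hs' x hx
      exact le_trans ((List.pairwise_cons.mp hszs).1 s' hs') (g7 x hx)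
    obtain ⟨hA2, hfa, hpm, hwit, htm⟩ := ih (bStep procs (i, hB) s).1 hA1 (bStep procs (i, hB) s).2
      hp hlen (List.pairwise_cons.mp hszs).2 (fun s' hs' => hbound s' (List.mem_cons_of_mem _ hs'))
      g1 g2 g3 g4 g5 g6 hcap'
    have hfoldA : (s :: ss).foldl (fun st size => match st with | none => none | some h => aStep h size) (some hA)
        = ss.foldl (fun st size => match st with | none => none | some h => aStep h size) (some hA1) := by
      rw [List.foldl_cons]
      congr 1
    refine ⟨hA2, ?_, ?_, ?_, htm⟩
    · rw [hfoldA]; exact hfa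
    · rw [List.foldl_cons]; exact hpm
    · intro _
      rw [List.foldl_cons]
      exact hwit (Or.inl g8)

theorem main_equiv (ps cap : List Int) (hps : ps ≠ []) (hcapne : cap ≠ []) :
    get_minimum_time ps cap = get_minimum_time_alt ps cap := by
  obtain ⟨mc, hmc⟩ : ∃ v, PySem.List.max? cap (fun y => y) = some v := by
    cases h : PySem.List.max? cap (fun y => y) with
    | none => exact absurd ((PySem.List.max?_eq_none_iff _ _).mp h) hcapne
    | some v => exact ⟨v, rfl⟩
  obtain ⟨mp, hmp⟩ : ∃ v, PySem.List.max? ps (fun y => y) = some v := by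
    cases h : PySem.List.max? ps (fun y => y) with
    | none => exact absurd ((PySem.List.max?_eq_none_iff _ _).mp h) hps
    | some v => exact ⟨v, rfl⟩
  simp only [get_minimum_time, get_minimum_time_alt, hmc, hmp, Option.elim_some]
  by_cases hgt : mp > mc
  · rw [if_pos hgt, if_pos hgt]
  · rw [if_neg hgt, if_neg hgt]
    set procs := PySem.List.sorted cap (fun y => y) false with hprocs
    set sizes := PySem.List.sorted ps (fun y => y) true with hsizes
    have hpp : procs.Pairwise (· ≤ ·) := by
      have := PySem.List.sorted_pairwise (xs := cap) (key := fun y => y)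
      simpa using this
    have hplen : 0 < procs.length := by
      rw [hprocs, PySem.List.length_sorted]
      exact List.length_pos_iff.mpr hcapne
    have hszs : sizes.Pairwise (fun a b => b ≤ a) := by
      have := PySem.List.sorted_pairwise_rev (xs := ps) (key := fun y => y)
      simpa using this
    have hmpmax : ∀ y ∈ ps, y ≤ mp := by
      have := PySem.List.max?_isMax hmp
      simpa using this
    have hlast : mc ≤ procs.getD (procs.length - 1) 0 := by
      have hmem2 : mc ∈ procs := by
        rw [hprocs, PySem.List.mem_sorted]
        exact PySem.List.max?_mem hmc
      obtain ⟨k, hk, hck⟩ := List.mem_iff_getElem.mp hmem2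
      have hl1 : procs.length - 1 < procs.length := by omega
      rw [List.getD_eq_getElem procs 0 hl1]
      rcases Nat.lt_or_ge k (procs.length - 1) with h' | h'
      · have := List.pairwise_iff_getElem.mp hpp k (procs.length - 1) hk hl1 h'
        rw [hck] at this
        exact this
      · have hkeq : k = procs.length - 1 := by omega
        subst hkeq
        exact le_of_eq hck.symm
    have hbound : ∀ s ∈ sizes, s ≤ procs.getD (procs.length - 1) 0 := by
      intro s hs
      have hsps : s ∈ ps := (PySem.List.mem_sorted _ _ _ _).mp hs
      have h1 := hmpmax s hsps
      have h2 : mp ≤ mc := not_lt.mp hgt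
      omega
    have hperm0 : ((cap.map (fun c => ((0:Int), -c))).foldl (fun h x => hpush x h) []).Perm
        ([] ++ pend procs procs.length) := by
      refine (foldl_hpush_perm _ _).trans ?_
      simp only [List.nil_append]
      unfold pend
      rw [List.take_length]
      exact ((PySem.List.sorted_perm (xs := cap) (key := fun y => y) (rev := false)).map _).symm
    obtain ⟨hA', hfold, hpermF, hwit, htimeF⟩ := fold_lemma procs sizes procs.length
        ((cap.map (fun c => ((0:Int), -c))).foldl (fun h x => hpush x h) []) []
        hpp hplen hszs hbound (le_refl _) (by simp) hperm0
        (foldl_hpush_pairwise _ List.Pairwise.nil) List.Pairwise.nil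
        (by
          intro x hx
          have hx2 := (foldl_hpush_perm _ []).mem_iff.mp hx
          rw [List.nil_append] at hx2
          obtain ⟨c, -, rfl⟩ := List.mem_map.mp hx2
          exact le_refl 0)
        (by intro s _ x hx; exact absurd hx (List.not_mem_nil))
    have hsne : sizes ≠ [] := by
      rw [hsizes, Ne, PySem.List.sorted_eq_nil_iff]
      exact hps
    obtain ⟨w, hw, hw2⟩ := hwit (Or.inr hsne)
    obtain ⟨mB, hmB⟩ : ∃ v, PySem.List.max? (((sizes.foldl (bStep procs) (procs.length, [])).2).map Prod.fst) (fun y => y) = some v := by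
      cases h : PySem.List.max? (((sizes.foldl (bStep procs) (procs.length, [])).2).map Prod.fst) (fun y => y) with
      | none =>
        have := List.map_eq_nil_iff.mp ((PySem.List.max?_eq_none_iff _ _).mp h)
        rw [this] at hw
        exact absurd hw (List.not_mem_nil)
      | some v => exact ⟨v, rfl⟩
    have hwA : w ∈ hA' := hpermF.mem_iff.mpr (List.mem_append_left _ hw)
    obtain ⟨mA, hmA⟩ : ∃ v, PySem.List.max? (hA'.map Prod.fst) (fun y => y) = some v := by
      cases h : PySem.List.max? (hA'.map Prod.fst) (fun y => y) with
      | none =>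
        have := List.map_eq_nil_iff.mp ((PySem.List.max?_eq_none_iff _ _).mp h)
        rw [this] at hwA
        exact absurd hwA (List.not_mem_nil)
      | some v => exact ⟨v, rfl⟩
    have hmBmax : ∀ y ∈ ((sizes.foldl (bStep procs) (procs.length, [])).2).map Prod.fst, y ≤ mB := by
      have := PySem.List.max?_isMax hmB
      simpa using this
    have hmAmax : ∀ y ∈ hA'.map Prod.fst, y ≤ mA := by
      have := PySem.List.max?_isMax hmA
      simpa using this
    have h2B : 2 ≤ mB := le_trans hw2 (hmBmax w.1 (List.mem_map_of_mem hw))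
    have h2A : 2 ≤ mA := le_trans hw2 (hmAmax w.1 (List.mem_map_of_mem hwA))
    have hABeq : mA = mB := by
      refine le_antisymm ?_ ?_
      · obtain ⟨z, hz, hz1⟩ := List.mem_map.mp (PySem.List.max?_mem hmA)
        rcases List.mem_append.mp (hpermF.mem_iff.mp hz) with h' | h'
        · exact hz1 ▸ hmBmax z.1 (List.mem_map_of_mem h')
        · obtain ⟨c, -, rfl⟩ := List.mem_map.mp h'
          simp at hz1
          omega
      · obtain ⟨z, hz, hz1⟩ := List.mem_map.mp (PySem.List.max?_mem hmB)
        have hzA : z ∈ hA' := hpermF.mem_iff.mpr (List.mem_append_left _ hz)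
        exact hz1 ▸ hmAmax z.1 (List.mem_map_of_mem hzA)
    rw [hfold]
    simp only [hmA, hmB, hABeq]
    rw [max_eq_right (by omega)]
    rfl

-- ===== VERDICT (by name: the statement is the Claim_ definition above) =====
theorem get_minimum_time_spec : Claim_equal_get_minimum_time := by
  intro process_sizes capacity _ hpre
  exact main_equiv process_sizes capacity hpre.1 hpre.2
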